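-- pv_equiv track=rewrite | github.com/glideinWMS/glideinwms | tools/glidein_status.py | entry_cmp
-- ===== SOURCE A (Python) =====
-- def cmp(a, b):
--     return (a > b) - (a < b)
--
-- def entry_cmp(x, y):
--     # Total always last
--     if x == "Total":
--         if y == "Total":
--             return 0
--         else:
--             return 1
--     elif y == "Total":
--         return -1
--
--     # split in pieces and sort end to front
--     x_arr = x.split("@")
--     y_arr = y.split("@")
--     for i in (2, 1, 0):
--         res = cmp(x_arr[i], y_arr[i])
--         if res != 0:
--             return res
--     return 0
-- ===== SOURCE B (Python) =====
-- def _key(s):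
--     # flatten the '@'-pieces into ONE sortable key string, end-to-front,
--     # joined with "\x00", which sorts below every printable character
--     arr = s.split("@")
--     return "\x00".join((arr[2], arr[1], arr[0]))
--
-- def entry_cmp(x, y):
--     # "Total" sorts last; bool arithmetic gives 0/1/-1 without comparing pieces
--     tx = x == "Total"
--     ty = y == "Total"
--     if tx or ty:
--         return tx - ty
--     kx = _key(x)
--     ky = _key(y)
--     return (kx > ky) - (kx < ky)
-- ===== Notes on version B (the rewrite author's own statement) =====
-- stated objective: alternative
-- what changed: Replaces A's unrolled (2,1,0) early-return field loop by building one flattened sort-key string per argument (the '@'-pieces end-to-front joined with "\x00", a separator smaller than every printable character) and returning a single comparison of the two keys; the 'Total' branch ladder becomes bool arithmetic tx - ty.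
import Mathlib
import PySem

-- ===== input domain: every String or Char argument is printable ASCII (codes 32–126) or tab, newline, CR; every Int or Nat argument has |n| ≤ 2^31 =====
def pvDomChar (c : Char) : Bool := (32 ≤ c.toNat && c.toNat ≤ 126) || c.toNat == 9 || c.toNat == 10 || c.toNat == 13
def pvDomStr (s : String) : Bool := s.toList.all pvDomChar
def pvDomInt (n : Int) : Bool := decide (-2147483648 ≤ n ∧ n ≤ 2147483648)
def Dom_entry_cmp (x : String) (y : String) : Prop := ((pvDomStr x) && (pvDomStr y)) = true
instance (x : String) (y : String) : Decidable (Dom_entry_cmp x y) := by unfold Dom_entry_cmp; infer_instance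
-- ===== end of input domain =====

-- B replaces A's unrolled early-return field loop by ONE flattened key string per argument
-- (the '@'-pieces end-to-front joined with "\x00", which sorts below every printable domain
-- character), compared once; the "Total" tags are plain bool arithmetic (objective: alternative).

-- ===== PORT A =====
-- s.split("@"): the separator "@" is non-empty, so Python never raises and split? is always some
def pvSplitAt (s : String) : List String := (PySem.Str.split? s "@").getD []

-- cmp(a, b) = (a > b) - (a < b)
def pyCmp (a : String) (b : String) : Int :=
  (if a > b then (1 : Int) else 0) - (if a < b then (1 : Int) else 0)

-- the 'for i in (2, 1, 0)' loop with its early return; indexing is in range inside Pre_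
def entry_cmp_go (xa : List String) (ya : List String) : List Nat → Int
  | [] => 0
  | i :: rest =>
      let res := pyCmp (xa.getD i "") (ya.getD i "")
      if res ≠ 0 then res else entry_cmp_go xa ya rest

def entry_cmp (x : String) (y : String) : Int :=
  if x = "Total" then
    if y = "Total" then 0 else 1
  else if y = "Total" then -1
  else
    let x_arr := pvSplitAt x
    let y_arr := pvSplitAt y
    entry_cmp_go x_arr y_arr [2, 1, 0]

-- ===== PORT B =====
-- _key(s): the '@'-pieces end-to-front joined with "\x00" as ONE sortable key; the key is
-- kept as its code-point list (PySem strings are defined on List Char, and Python's str '<'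
-- is exactly Lean's '<' on toList).  arr[2]/arr[1]/arr[0] are in range inside Pre_.
def pvKey (s : String) : List Char :=
  let arr := pvSplitAt s
  PySem.Chars.join ['\x00'] [(arr.getD 2 "").toList, (arr.getD 1 "").toList, (arr.getD 0 "").toList]

-- tx - ty on Python bools, else one comparison of the two flattened keys
def entry_cmp_alt (x : String) (y : String) : Int :=
  let tx := x = "Total"
  let ty := y = "Total"
  if tx ∨ ty then (if tx then (1 : Int) else 0) - (if ty then (1 : Int) else 0)
  else
    let kx := pvKey x
    let ky := pvKey y
    (if ky < kx then (1 : Int) else 0) - (if kx < ky then (1 : Int) else 0)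

-- ===== PRECONDITION & SPEC =====
-- Pre_ excludes exactly the inputs where Python A raises IndexError: a compared (non-"Total")
-- string whose '@'-split has fewer than 3 pieces.
def Pre_entry_cmp (x : String) (y : String) : Prop :=
  x = "Total" ∨ y = "Total" ∨
    (3 ≤ (pvSplitAt x).length ∧ 3 ≤ (pvSplitAt y).length)
instance (x : String) (y : String) : Decidable (Pre_entry_cmp x y) := by
  unfold Pre_entry_cmp; infer_instance

def pvWitness_entry_cmp : String × String := ("a@b@c", "d@e@f")

def Spec_entry_cmp (x : String) (y : String) (out : Int) : Prop := out = entry_cmp_alt x y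
instance (x : String) (y : String) (out : Int) : Decidable (Spec_entry_cmp x y out) := by
  unfold Spec_entry_cmp; infer_instance

-- ===== CLAIM (what is proved, stated in full; the proofs are below) =====
def Claim_equal_entry_cmp : Prop := ∀ (x : String) (y : String),
  Dom_entry_cmp x y → Pre_entry_cmp x y → Spec_entry_cmp x y (entry_cmp x y)

-- ===== LEMMAS AND PROOFS =====

-- every character of every piece produced by splitOn.go comes from l, cur or acc
theorem splitOn_go_all (p : Char → Bool) (sep : List Char) :
    ∀ (fuel : Nat) (l cur : List Char) (acc : List (List Char)),
      (∀ c ∈ l, p c = true) → (∀ c ∈ cur, p c = true) →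
      (∀ t ∈ acc, ∀ c ∈ t, p c = true) →
      ∀ t ∈ PySem.Chars.splitOn.go sep fuel l cur acc, ∀ c ∈ t, p c = true := by
  intro fuel
  induction fuel with
  | zero =>
      intro l cur acc hl hc ha t ht c hcmem
      rw [PySem.Chars.splitOn.go] at ht
      simp only [List.mem_reverse, List.mem_cons] at ht
      rcases ht with h | h
      · subst h
        rcases List.mem_append.mp hcmem with h' | h'
        · exact hc c (List.mem_reverse.mp h')
        · exact hl c h'
      · exact ha t h c hcmem
  | succ fuel ih =>
      intro l cur acc hl hc ha t ht c hcmem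
      cases l with
      | nil =>
          rw [PySem.Chars.splitOn.go] at ht
          · simp only [List.mem_reverse, List.mem_cons] at ht
            rcases ht with h | h
            · subst h; exact hc c (List.mem_reverse.mp hcmem)
            · exact ha t h c hcmem
          · omega
      | cons a rest =>
          rw [PySem.Chars.splitOn.go] at ht
          by_cases hpre : sep.isPrefixOf (a :: rest) = true
          · simp only [hpre, if_true] at ht
            refine ih _ [] (cur.reverse :: acc) ?_ (by simp) ?_ t ht c hcmem
            · intro d hd; exact hl d (List.mem_of_mem_drop hd)
            · intro u hu d hd
              rcases List.mem_cons.mp hu with h | h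
              · subst h; exact hc d (List.mem_reverse.mp hd)
              · exact ha u h d hd
          · simp only [hpre] at ht
            refine ih rest (a :: cur) acc ?_ ?_ ha t ht c hcmem
            · intro d hd; exact hl d (List.mem_cons_of_mem a hd)
            · intro d hd
              rcases List.mem_cons.mp hd with h | h
              · subst h; exact hl d List.mem_cons_self
              · exact hc d h

-- characters of the '@'-split pieces of a domain string stay in the domain
theorem split_pieces_dom (s : String) (hs : pvDomStr s = true) :
    ∀ t ∈ pvSplitAt s, ∀ c ∈ t.toList, pvDomChar c = true := by
  intro t ht c hc
  have hsplit : pvSplitAt s =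
      (PySem.Chars.splitOn s.toList "@".toList).map String.ofList := rfl
  rw [hsplit] at ht
  rcases List.mem_map.mp ht with ⟨cs, hcs, rfl⟩
  have hall : ∀ d ∈ s.toList, pvDomChar d = true := fun d hd =>
    (List.all_eq_true).mp hs d hd
  rw [String.toList_ofList] at hc
  exact splitOn_go_all pvDomChar "@".toList (s.toList.length + 1) s.toList [] []
    hall (by simp) (by simp) cs hcs c hc

-- a domain character is strictly greater than the key separator '\x00'
theorem dom_char_gt (c : Char) (h : pvDomChar c = true) : ('\x00' : Char) < c := by
  simp only [pvDomChar, Bool.or_eq_true, Bool.and_eq_true, decide_eq_true_eq,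
    beq_iff_eq] at h
  have h1 : 0 < c.toNat := by omega
  have h0 : ('\x00' : Char).val.toNat = 0 := by decide
  refine Char.lt_def.mpr (UInt32.lt_iff_toNat_lt.mpr ?_)
  rw [h0]; exact h1

-- separator-tagged lexicographic splitting: comparing a++sep::r with b++sep::s is the
-- pair comparison, when the separator is below every character of a and b
theorem sep_append_lt (a : List Char) :
    ∀ (b r s : List Char),
      (∀ c ∈ a, ('\x00' : Char) < c) → (∀ c ∈ b, ('\x00' : Char) < c) →
      ((a ++ '\x00' :: r) < (b ++ '\x00' :: s) ↔ a < b ∨ (a = b ∧ r < s)) := by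
  induction a with
  | nil =>
      intro b r s _ hb
      cases b with
      | nil => simp
      | cons d b' =>
          have hd : ('\x00' : Char) < d := hb d List.mem_cons_self
          simp [List.cons_lt_cons_iff, hd, List.nil_lt_cons]
  | cons c a' ih =>
      intro b r s ha hb
      have hc : ('\x00' : Char) < c := ha c List.mem_cons_self
      cases b with
      | nil =>
          simp [List.cons_lt_cons_iff, lt_asymm hc, ne_of_gt hc, List.not_lt_nil]
      | cons d b' =>
          have hih := ih b' r s (fun e he => ha e (List.mem_cons_of_mem c he))
            (fun e he => hb e (List.mem_cons_of_mem d he))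
          simp only [List.cons_append, List.cons_lt_cons_iff, List.cons_eq_cons, hih]
          tauto

-- the flattened key order is the (piece2, piece1, piece0) lexicographic order
theorem key_lt_iff (a0 a1 a2 b0 b1 b2 : List Char)
    (ha1 : ∀ c ∈ a1, ('\x00' : Char) < c) (ha2 : ∀ c ∈ a2, ('\x00' : Char) < c)
    (hb1 : ∀ c ∈ b1, ('\x00' : Char) < c) (hb2 : ∀ c ∈ b2, ('\x00' : Char) < c) :
    ((a2 ++ '\x00' :: (a1 ++ '\x00' :: a0)) < (b2 ++ '\x00' :: (b1 ++ '\x00' :: b0)) ↔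
      a2 < b2 ∨ (a2 = b2 ∧ (a1 < b1 ∨ (a1 = b1 ∧ a0 < b0)))) := by
  simp only [sep_append_lt a2 b2 _ _ ha2 hb2, sep_append_lt a1 b1 _ _ ha1 hb1]

-- A's unrolled (2,1,0) early-return loop computes the triple lexicographic comparison
theorem go_eq_triple (p0 p1 p2 : String) (prest : List String)
    (q0 q1 q2 : String) (qrest : List String) :
    entry_cmp_go (p0 :: p1 :: p2 :: prest) (q0 :: q1 :: q2 :: qrest) [2, 1, 0] =
      (if q2 < p2 ∨ (q2 = p2 ∧ (q1 < p1 ∨ (q1 = p1 ∧ q0 < p0))) then (1 : Int) else 0) -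
        (if p2 < q2 ∨ (p2 = q2 ∧ (p1 < q1 ∨ (p1 = q1 ∧ p0 < q0))) then (1 : Int) else 0) := by
  rcases lt_trichotomy p2 q2 with h2 | h2 | h2 <;>
    [skip; (rcases lt_trichotomy p1 q1 with h1 | h1 | h1 <;>
      [skip; (rcases lt_trichotomy p0 q0 with h0 | h0 | h0); skip]); skip] <;>
  simp_all [entry_cmp_go, pyCmp, List.getD, ne_of_lt, ne_of_gt, lt_asymm]

-- ===== VERDICT (by name: the statements are the Claim_ definitions above) =====
set_option maxHeartbeats 1600000 in
theorem entry_cmp_spec : Claim_equal_entry_cmp := by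
  intro x y hdom hpre
  unfold Spec_entry_cmp entry_cmp entry_cmp_alt pvKey
  by_cases hx : x = "Total" <;> by_cases hy : y = "Total"
  · simp [hx, hy]
  · -- x Total, y not: the Total tags alone decide, no key is built
    simp [hx, hy]
  · -- y Total, x not
    simp [hx, hy]
  · -- main case: both split, both length ≥ 3
    rcases hpre with h | h | ⟨hlx, hly⟩
    · exact absurd h hx
    · exact absurd h hy
    simp only [hx, hy, if_false, or_self]
    have hdx : pvDomStr x = true := by
      simp only [Dom_entry_cmp, Bool.and_eq_true] at hdom; exact hdom.1
    have hdy : pvDomStr y = true := by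
      simp only [Dom_entry_cmp, Bool.and_eq_true] at hdom; exact hdom.2
    have hpc : ∀ t ∈ pvSplitAt x, ∀ c ∈ t.toList, ('\x00' : Char) < c := by
      intro t ht c hc; exact dom_char_gt c (split_pieces_dom x hdx t ht c hc)
    have hqc : ∀ t ∈ pvSplitAt y, ∀ c ∈ t.toList, ('\x00' : Char) < c := by
      intro t ht c hc; exact dom_char_gt c (split_pieces_dom y hdy t ht c hc)
    obtain ⟨p0, p1, p2, prest, hpx⟩ :
        ∃ p0 p1 p2 prest, pvSplitAt x = p0 :: p1 :: p2 :: prest := by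
      rcases hxa : pvSplitAt x with _ | ⟨p0, _ | ⟨p1, _ | ⟨p2, prest⟩⟩⟩
      · rw [hxa] at hlx; simp at hlx
      · rw [hxa] at hlx; simp at hlx
      · rw [hxa] at hlx; simp at hlx
      · exact ⟨p0, p1, p2, prest, rfl⟩
    obtain ⟨q0, q1, q2, qrest, hpy⟩ :
        ∃ q0 q1 q2 qrest, pvSplitAt y = q0 :: q1 :: q2 :: qrest := by
      rcases hya : pvSplitAt y with _ | ⟨q0, _ | ⟨q1, _ | ⟨q2, qrest⟩⟩⟩
      · rw [hya] at hly; simp at hly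
      · rw [hya] at hly; simp at hly
      · rw [hya] at hly; simp at hly
      · exact ⟨q0, q1, q2, qrest, rfl⟩
    rw [hpx, hpy]
    have hjoinx : PySem.Chars.join ['\x00']
        [((p0 :: p1 :: p2 :: prest).getD 2 "").toList,
         ((p0 :: p1 :: p2 :: prest).getD 1 "").toList,
         ((p0 :: p1 :: p2 :: prest).getD 0 "").toList] =
        p2.toList ++ '\x00' :: (p1.toList ++ '\x00' :: p0.toList) := by
      simp [List.getD, PySem.Chars.join_cons_cons, PySem.Chars.join_singleton,
        List.append_assoc]
    have hjoiny : PySem.Chars.join ['\x00']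
        [((q0 :: q1 :: q2 :: qrest).getD 2 "").toList,
         ((q0 :: q1 :: q2 :: qrest).getD 1 "").toList,
         ((q0 :: q1 :: q2 :: qrest).getD 0 "").toList] =
        q2.toList ++ '\x00' :: (q1.toList ++ '\x00' :: q0.toList) := by
      simp [List.getD, PySem.Chars.join_cons_cons, PySem.Chars.join_singleton,
        List.append_assoc]
    have hk := key_lt_iff p0.toList p1.toList p2.toList q0.toList q1.toList q2.toList
      (hpc p1 (by rw [hpx]; simp)) (hpc p2 (by rw [hpx]; simp))
      (hqc q1 (by rw [hpy]; simp)) (hqc q2 (by rw [hpy]; simp))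
    have hk' := key_lt_iff q0.toList q1.toList q2.toList p0.toList p1.toList p2.toList
      (hqc q1 (by rw [hpy]; simp)) (hqc q2 (by rw [hpy]; simp))
      (hpc p1 (by rw [hpx]; simp)) (hpc p2 (by rw [hpx]; simp))
    simp only [hjoinx, hjoiny]
    simp only [hk, hk']
    simp only [← String.lt_iff_toList_lt, String.toList_inj]
    exact go_eq_triple p0 p1 p2 prest q0 q1 q2 qrest
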